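-- pv_equiv track=rewrite | github.com/ovgu-FINken/driving_swarm_sliding_tiles | src/driving_swarm_sliding_tiles/driving_swarm_sliding_tiles/planner.py | make_node_constraints
-- ===== SOURCE A (Python) =====
-- from itertools import groupby
--
-- def make_node_constraints(plans) -> dict:
--     # get preconditions from plan
--     node_visits = {}
--     # node visits contains the order of robots visiting each node in the graph
--     for robot, plan in plans.items():
--         for t, n in enumerate(plan):
--             if n in node_visits.keys():
--                 node_visits[n].append((t, robot))
--             else:
--                 node_visits[n] = [(t, robot)]
--     for k in node_visits.keys():
--         node_visits[k] = [robot for _, robot in sorted(node_visits[k], key=lambda x: x[0])]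
--         node_visits[k] = [x[0] for x in groupby(node_visits[k])]
--     return node_visits
-- ===== SOURCE B (Python) =====
-- def make_node_constraints(plans) -> dict:
--     # One linear pass per phase: keys in first-occurrence order, then a
--     # time-major sweep that emits each node's robot sequence already in visit
--     # order with consecutive duplicates skipped -- no sorting, no groupby.
--     result = {}
--     for _, plan in plans.items():
--         for n in plan:
--             if n not in result:
--                 result[n] = []
--     horizon = 0
--     for _, plan in plans.items():
--         horizon = max(horizon, len(plan))
--     for t in range(horizon):
--         for robot, plan in plans.items():
--             if t < len(plan):
--                 visits = result[plan[t]]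
--                 if not visits or visits[-1] != robot:
--                     visits.append(robot)
--     return result
-- ===== Notes on version B (the rewrite author's own statement) =====
-- stated objective: faster
-- what changed: B drops the per-node sort and groupby entirely: after collecting the keys in first-occurrence order, one time-major sweep (t outermost, robots in dict order) appends each robot to its node's list only when it differs from the last entry, producing every node's deduped visit sequence already in time order.
import Mathlib
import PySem

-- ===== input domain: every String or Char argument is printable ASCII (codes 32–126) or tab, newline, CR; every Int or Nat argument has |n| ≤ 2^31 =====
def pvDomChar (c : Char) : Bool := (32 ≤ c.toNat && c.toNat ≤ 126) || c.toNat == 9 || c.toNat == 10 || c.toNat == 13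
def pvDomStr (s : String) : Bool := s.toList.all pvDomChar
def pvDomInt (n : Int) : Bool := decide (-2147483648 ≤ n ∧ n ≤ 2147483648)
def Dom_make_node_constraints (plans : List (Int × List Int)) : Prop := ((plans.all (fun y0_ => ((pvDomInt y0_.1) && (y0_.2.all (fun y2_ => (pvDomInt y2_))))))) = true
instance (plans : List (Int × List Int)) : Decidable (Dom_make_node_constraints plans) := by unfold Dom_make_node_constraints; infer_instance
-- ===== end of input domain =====

-- B replaces A's per-node sort + groupby by a single time-major sweep that emits each
-- node's robot sequence already in visit order (objective: faster, no sorting pass).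

-- ===== PORT A =====
-- [x[0] for x in groupby(lst)]: heads of the runs of consecutive equal elements
def pyGroupHeads : List Int → List Int
  | [] => []
  | x :: xs => x :: pyGroupHeads (xs.dropWhile (· == x))
termination_by l => l.length
decreasing_by exact Nat.lt_succ_of_le (List.length_dropWhile_le _ _)

def make_node_constraints (plans : List (Int × List Int)) : List (Int × List Int) :=
  let nv : PySem.Dict Int (List (Int × Int)) :=
    plans.foldl (fun nv rp =>
      (PySem.List.enumerate rp.2).foldl (fun nv tn =>
        if nv.contains tn.2 then nv.insert tn.2 (nv.getD tn.2 [] ++ [(tn.1, rp.1)])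
        else nv.insert tn.2 [(tn.1, rp.1)]) nv) PySem.Dict.empty
  -- the second loop retypes each value in place (list of pairs -> list of robots);
  -- ported as rebuilding the dict over the same keys, in the same order, reading nv
  let nv2 : PySem.Dict Int (List Int) :=
    nv.keys.foldl (fun d k =>
      -- node_visits[k] = [robot for _, robot in sorted(node_visits[k], key=lambda x: x[0])]
      let d1 := d.insert k ((PySem.List.sorted (nv.getD k []) (fun x => x.1)).map (fun x => x.2))
      -- node_visits[k] = [x[0] for x in groupby(node_visits[k])]
      d1.insert k (pyGroupHeads (d1.getD k []))) PySem.Dict.empty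
  nv2.items

-- ===== PORT B =====
def make_node_constraints_alt (plans : List (Int × List Int)) : List (Int × List Int) :=
  let d0 : PySem.Dict Int (List Int) :=
    plans.foldl (fun d rp =>
      rp.2.foldl (fun d n => if d.contains n then d else d.insert n []) d) PySem.Dict.empty
  let horizon : Int := plans.foldl (fun m rp => max m (rp.2.length : Int)) 0
  let d : PySem.Dict Int (List Int) :=
    (PySem.List.pyRange 0 horizon).foldl (fun d t =>
      plans.foldl (fun d rp =>
        if t < (rp.2.length : Int) then
          match PySem.List.pyGet? rp.2 t with
          | some n =>
            let visits := d.getD n []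
            if visits.getLast? == some rp.1 then d else d.insert n (visits ++ [rp.1])
          | none => d
        else d) d) d0
  d.items

-- ===== PRECONDITION & SPEC =====
def Spec_make_node_constraints (plans : List (Int × List Int)) (out : List (Int × List Int)) : Prop := out = make_node_constraints_alt plans
instance (plans : List (Int × List Int)) (out : List (Int × List Int)) : Decidable (Spec_make_node_constraints plans out) := by unfold Spec_make_node_constraints; infer_instance

-- ===== CLAIM (what is proved, stated in full; the proofs are below) =====
def Claim_equal_make_node_constraints : Prop := ∀ (plans : List (Int × List Int)), Dom_make_node_constraints plans → Spec_make_node_constraints plans (make_node_constraints plans)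

-- ===== LEMMAS AND PROOFS =====

-- ---- proof-only helper definitions ----

-- one step of consecutive-dedup appending, and its fold
def dcStep (acc : List Int) (r : Int) : List Int :=
  if acc.getLast? == some r then acc else acc ++ [r]
def dcFold (xs acc : List Int) : List Int := xs.foldl dcStep acc

-- the robot-major stream of (node, (t, robot)) triples A's first loop processes
def trips (plans : List (Int × List Int)) : List (Int × (Int × Int)) :=
  plans.flatMap (fun rp => (PySem.List.enumerate rp.2).map (fun tn => (tn.2, (tn.1, rp.1))))

def nodeStream (plans : List (Int × List Int)) : List Int := plans.flatMap (fun rp => rp.2)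

def horizonOf (plans : List (Int × List Int)) : Int :=
  plans.foldl (fun m rp => max m (rp.2.length : Int)) 0

-- the (t, robot-plan) pairs B's main double loop processes, time-major
def bPairs (plans : List (Int × List Int)) : List (Int × (Int × List Int)) :=
  (PySem.List.pyRange 0 (horizonOf plans)).flatMap (fun t => plans.map (fun rp => (t, rp)))

-- robots whose plan visits node n at time q.1, in stream order
def occOf (P : List (Int × (Int × List Int))) (n : Int) : List Int :=
  P.filterMap (fun q =>
    if q.1 < (q.2.2.length : Int) ∧ PySem.List.pyGet? q.2.2 q.1 = some n then some q.2.1 else none)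

-- A's per-node value transform (second loop body)
def aTrans (v : List (Int × Int)) : List Int :=
  pyGroupHeads ((PySem.List.sorted v (fun x => x.1)).map (fun x => x.2))

def stepA1 (d : PySem.Dict Int (List (Int × Int))) (p : Int × (Int × Int)) :
    PySem.Dict Int (List (Int × Int)) :=
  d.modify p.1 [] (· ++ [p.2])

def stepB0 (d : PySem.Dict Int (List Int)) (n : Int) : PySem.Dict Int (List Int) :=
  if d.contains n then d else d.insert n []

def stepB (d : PySem.Dict Int (List Int)) (q : Int × (Int × List Int)) :
    PySem.Dict Int (List Int) :=
  if q.1 < (q.2.2.length : Int) then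
    match PySem.List.pyGet? q.2.2 q.1 with
    | some n =>
      let visits := d.getD n []
      if visits.getLast? == some q.2.1 then d else d.insert n (visits ++ [q.2.1])
    | none => d
  else d

-- ---- generic small lemmas ----

theorem mem_of_pyGet?_eq_some {α : Type} {xs : List α} {i : Int} {x : α}
    (h : PySem.List.pyGet? xs i = some x) : x ∈ xs := by
  simp only [PySem.List.pyGet?, Option.bind_eq_some_iff] at h
  obtain ⟨k, -, hk⟩ := h
  exact List.mem_of_getElem? hk

theorem le_foldl_max (l : List (Int × List Int)) :
    ∀ m : Int, m ≤ l.foldl (fun m rp => max m (rp.2.length : Int)) m := by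
  induction l with
  | nil => intro m; exact le_rfl
  | cons a l ih =>
    intro m
    exact le_trans (le_max_left m _) (ih (max m (a.2.length : Int)))

theorem length_le_horizonOf (plans : List (Int × List Int)) :
    ∀ rp ∈ plans, (rp.2.length : Int) ≤ horizonOf plans := by
  have aux : ∀ (l : List (Int × List Int)) (m : Int), ∀ rp ∈ l,
      (rp.2.length : Int) ≤ l.foldl (fun m rp => max m (rp.2.length : Int)) m := by
    intro l
    induction l with
    | nil => intro m rp h; cases h
    | cons a l ih =>
      intro m rp h
      rcases List.mem_cons.mp h with h | h
      · subst h; exact le_trans (le_max_right m _) (le_foldl_max l _)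
      · exact ih _ rp h
  exact aux plans 0

theorem pyRange_zero_eq (h : Int) :
    PySem.List.pyRange 0 h = List.map (fun k : Nat => (k : Int)) (List.range h.toNat) := by
  unfold PySem.List.pyRange
  by_cases hp : 0 < h
  · simp only [if_neg (by norm_num : ¬(1:Int) = 0), if_pos (by norm_num : (0:Int) < 1), if_pos hp,
      show ((h - 0 + 1 - 1) / 1 : Int) = h by omega]
    exact List.map_congr_left (fun k _ => by ring)
  · simp only [if_neg (by norm_num : ¬(1:Int) = 0), if_pos (by norm_num : (0:Int) < 1), if_neg hp,
      show h.toNat = 0 by omega]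
    simp

theorem mem_pyRange_zero {h t : Int} : t ∈ PySem.List.pyRange 0 h ↔ 0 ≤ t ∧ t < h := by
  rw [pyRange_zero_eq]
  simp only [List.mem_map, List.mem_range]
  constructor
  · rintro ⟨k, hk, rfl⟩; omega
  · rintro ⟨h0, hlt⟩
    exact ⟨t.toNat, by omega, by omega⟩

theorem pairwise_lt_pyRange_zero (h : Int) :
    (PySem.List.pyRange 0 h).Pairwise (· < ·) := by
  rw [pyRange_zero_eq, List.pairwise_map]
  exact List.pairwise_lt_range.imp (fun hab => by exact_mod_cast hab)

-- dcFold started from a block with last element a = groupHeads after dropping a's run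
theorem dcFold_append_last (xs : List Int) :
    ∀ (acc : List Int) (a : Int),
      dcFold xs (acc ++ [a]) = acc ++ [a] ++ pyGroupHeads (xs.dropWhile (· == a)) := by
  induction xs with
  | nil => intro acc a; simp [dcFold, pyGroupHeads]
  | cons x xs ih =>
    intro acc a
    by_cases hax : a = x
    · have h1 : dcStep (acc ++ [a]) x = acc ++ [a] := by
        simp [dcStep, hax]
      have h2 : dcFold (x :: xs) (acc ++ [a]) = dcFold xs (acc ++ [a]) := by
        simp only [dcFold, List.foldl_cons, h1]
      rw [h2, ih acc a, List.dropWhile_cons, if_pos (by simp [hax.symm])]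
    · have h1 : dcStep (acc ++ [a]) x = (acc ++ [a]) ++ [x] := by
        simp [dcStep, hax]
      have h2 : dcFold (x :: xs) (acc ++ [a]) = dcFold xs ((acc ++ [a]) ++ [x]) := by
        simp only [dcFold, List.foldl_cons, h1]
      rw [h2, ih (acc ++ [a]) x, List.dropWhile_cons,
        if_neg (by simp; exact fun e => hax e.symm), pyGroupHeads]
      simp

theorem dcFold_nil_eq_groupHeads (xs : List Int) : dcFold xs [] = pyGroupHeads xs := by
  cases xs with
  | nil => simp [dcFold, pyGroupHeads]
  | cons x xs =>
    have : dcFold (x :: xs) [] = dcFold xs ([] ++ [x]) := by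
      simp [dcFold, dcStep]
    rw [this, dcFold_append_last xs [] x, pyGroupHeads]
    simp

-- ---- insertion-sort fiber lemmas ----

theorem insertBy_append_skip {α : Type} (before : α → α → Bool) (x : α) (ys zs : List α)
    (h : ∀ y ∈ ys, before x y = false) :
    PySem.List.insertBy before x (ys ++ zs) = ys ++ PySem.List.insertBy before x zs := by
  induction ys with
  | nil => rfl
  | cons y ys ih =>
    have hy : before x y = false := h y (List.mem_cons_self)
    rw [List.cons_append, PySem.List.insertBy, if_neg (by simp [hy])]
    rw [ih (fun y hy => h y (List.mem_cons_of_mem _ hy))]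
    rfl

theorem flatMap_congr_mem {α β : Type} {l : List α} {f g : α → List β}
    (h : ∀ a ∈ l, f a = g a) : l.flatMap f = l.flatMap g := by
  induction l with
  | nil => rfl
  | cons a l ih =>
    simp only [List.flatMap_cons, h a List.mem_cons_self,
      ih (fun b hb => h b (List.mem_cons_of_mem _ hb))]

theorem insertBy_cons_of_true {α : Type} (before : α → α → Bool) (x : α) (zs : List α)
    (h : ∀ y ∈ zs, before x y = true) :
    PySem.List.insertBy before x zs = x :: zs := by
  cases zs with
  | nil => rfl
  | cons z zs => rw [PySem.List.insertBy, if_pos (h z List.mem_cons_self)]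

theorem insertBy_fiber (ts : List Int) (B : Int → List (Int × Int)) (x : Int × Int)
    (hinc : ts.Pairwise (· < ·)) (hB : ∀ t, ∀ q ∈ B t, q.1 = t) (hx : x.1 ∈ ts) :
    PySem.List.insertBy (fun a b => decide (a.1 < b.1)) x (ts.flatMap B) =
      ts.flatMap (fun t => if t = x.1 then B t ++ [x] else B t) := by
  induction ts with
  | nil => cases hx
  | cons t ts ih =>
    have hlt : ∀ u ∈ ts, t < u := fun u hu => List.rel_of_pairwise_cons hinc hu
    have hskip : ∀ y ∈ B t, (fun a b : Int × Int => decide (a.1 < b.1)) x y = false := by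
      intro y hy
      have : y.1 = t := hB t y hy
      simp only [decide_eq_false_iff_not, this]
      rcases List.mem_cons.mp hx with h | h
      · omega
      · have := hlt _ h; omega
    rw [List.flatMap_cons, insertBy_append_skip _ _ _ _ hskip, List.flatMap_cons]
    by_cases hxt : x.1 = t
    · have hall : ∀ y ∈ ts.flatMap B, (fun a b : Int × Int => decide (a.1 < b.1)) x y = true := by
        intro y hy
        rcases List.mem_flatMap.mp hy with ⟨u, hu, hyu⟩
        have h1 : y.1 = u := hB u y hyu
        have h2 := hlt _ hu
        simp only [decide_eq_true_eq, h1]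
        omega
      rw [insertBy_cons_of_true _ _ _ hall, if_pos hxt.symm]
      have hrest : ts.flatMap (fun u => if u = x.1 then B u ++ [x] else B u) = ts.flatMap B := by
        refine flatMap_congr_mem (fun u hu => ?_)
        have := hlt _ hu
        rw [if_neg (by omega)]
      rw [hrest]
      simp
    · have hx' : x.1 ∈ ts := by
        rcases List.mem_cons.mp hx with h | h
        · exact absurd h hxt
        · exact h
      rw [ih (List.Pairwise.of_cons hinc) hx', if_neg (fun e => hxt e.symm)]

theorem sorted_eq_fiber_flatMap (L : List (Int × Int)) (h : Int)
    (hall : ∀ q ∈ L, 0 ≤ q.1 ∧ q.1 < h) :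
    PySem.List.sorted L (fun x => x.1) =
      (PySem.List.pyRange 0 h).flatMap (fun t => L.filter (fun q => q.1 == t)) := by
  induction L using List.reverseRecOn with
  | nil => simp [PySem.List.sorted]
  | append_singleton L q ih =>
    have hallL : ∀ p ∈ L, 0 ≤ p.1 ∧ p.1 < h :=
      fun p hp => hall p (List.mem_append_left _ hp)
    have hq : 0 ≤ q.1 ∧ q.1 < h := hall q (List.mem_append_right _ List.mem_cons_self)
    rw [PySem.List.sorted_eq_foldl_insertBy, List.foldl_append, List.foldl_cons, List.foldl_nil,
      ← PySem.List.sorted_eq_foldl_insertBy, ih hallL,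
      insertBy_fiber _ _ _ (pairwise_lt_pyRange_zero h)
        (fun t p hp => by simpa using (List.mem_filter.mp hp).2)
        (mem_pyRange_zero.mpr hq)]
    refine flatMap_congr_mem (fun t ht => ?_)
    rw [List.filter_append]
    by_cases hqt : t = q.1
    · rw [if_pos hqt, List.filter_cons, if_pos (by simp [hqt]), List.filter_nil]
    · rw [if_neg hqt, List.filter_cons, if_neg (by simp; omega), List.filter_nil, List.append_nil]

-- ---- characterisation of A ----

theorem phase2_items (T : PySem.Dict Int (List (Int × Int))) (hnodup : T.keys.Nodup) :
    (T.keys.foldl (fun d k =>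
        let d1 := d.insert k ((PySem.List.sorted (T.getD k []) (fun x => x.1)).map (fun x => x.2))
        d1.insert k (pyGroupHeads (d1.getD k []))) PySem.Dict.empty).items =
      T.keys.map (fun n => (n, aTrans (T.getD n []))) := by
  have hstep : (fun (d : PySem.Dict Int (List Int)) k =>
      let d1 := d.insert k ((PySem.List.sorted (T.getD k []) (fun x => x.1)).map (fun x => x.2))
      d1.insert k (pyGroupHeads (d1.getD k []))) =
        fun d k => d.insert k (aTrans (T.getD k [])) := by
    funext d k
    show (d.insert k _).insert k _ = _
    rw [PySem.Dict.getD_insert_self, PySem.Dict.insert_insert_self]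
    rfl
  rw [hstep]
  rw [PySem.Dict.items_foldl_insert_fresh T.keys (fun k => k)
    (fun k => aTrans (T.getD k [])) PySem.Dict.empty
    (fun a _ => PySem.Dict.contains_empty a) (by simpa using hnodup)]
  show [] ++ _ = _
  rw [List.nil_append]

theorem stepA_eq (d : PySem.Dict Int (List (Int × Int))) (n : Int) (v : Int × Int) :
    (if d.contains n then d.insert n (d.getD n [] ++ [v]) else d.insert n [v]) =
      stepA1 d (n, v) := by
  by_cases hc : d.contains n
  · rw [if_pos hc]; rfl
  · rw [if_neg hc]
    show _ = d.insert n (d.getD n [] ++ [v])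
    rw [PySem.Dict.getD_of_not_contains d [] (by simpa using hc)]
    rfl

theorem A_phase1_eq : ∀ (plans : List (Int × List Int)),
    (plans.foldl (fun nv rp =>
        (PySem.List.enumerate rp.2).foldl (fun nv tn =>
          if nv.contains tn.2 then nv.insert tn.2 (nv.getD tn.2 [] ++ [(tn.1, rp.1)])
          else nv.insert tn.2 [(tn.1, rp.1)]) nv) PySem.Dict.empty) =
      (trips plans).foldl stepA1 PySem.Dict.empty := by
  intro plans
  unfold trips
  rw [List.foldl_flatMap]
  refine congrArg (fun F => List.foldl F PySem.Dict.empty plans)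
    (funext fun d => funext fun rp => ?_)
  rw [List.foldl_map]
  exact congrArg (fun F => List.foldl F d (PySem.List.enumerate rp.2))
    (funext fun d => funext fun tn => stepA_eq d tn.2 (tn.1, rp.1))

theorem A_char (plans : List (Int × List Int)) :
    make_node_constraints plans =
      (PySem.Set.ofList (nodeStream plans)).map (fun n =>
        (n, aTrans (((trips plans).filter (fun p => p.1 == n)).map (fun p => p.2)))) := by
  unfold make_node_constraints
  rw [A_phase1_eq plans]
  set T := (trips plans).foldl stepA1 PySem.Dict.empty with hT
  have hkeys : T.keys = PySem.Set.ofList (nodeStream plans) := by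
    rw [hT]
    show (List.foldl (fun d (p : Int × (Int × Int)) => d.modify p.1 [] (· ++ [p.2]))
      PySem.Dict.empty (trips plans)).keys = _
    rw [PySem.Dict.keys_foldl_modify_key (trips plans) (fun p => p.1) [] (fun _ p => (· ++ [p.2]))
      PySem.Dict.empty]
    rw [PySem.Dict.keys_empty, PySem.Set.update_nil_left]
    congr 1
    unfold trips nodeStream
    rw [List.map_flatMap]
    refine flatMap_congr_mem (fun rp _ => ?_)
    rw [List.map_map]
    exact PySem.List.map_snd_enumerate _ _
  have hnodup : T.keys.Nodup := by
    rw [hkeys]; exact PySem.Set.nodup_ofList _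
  have hval : ∀ n : Int, T.getD n [] =
      ((trips plans).filter (fun p => p.1 == n)).map (fun p => p.2) := by
    intro n
    rw [hT]
    show (List.foldl (fun d (p : Int × (Int × Int)) => d.modify p.1 [] (· ++ [p.2]))
      PySem.Dict.empty (trips plans)).getD n [] = _
    rw [PySem.Dict.getD_foldl_modify_append, PySem.Dict.getD_empty, List.nil_append]
  rw [show (have nv := T;
      have nv2 :=
        List.foldl
          (fun d k =>
            have d1 := d.insert k (List.map (fun x => x.2)
              (PySem.List.sorted (nv.getD k []) fun x => x.1));
            d1.insert k (pyGroupHeads (d1.getD k [])))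
          PySem.Dict.empty nv.keys;
      nv2.items) =
      (T.keys.foldl (fun d k =>
        let d1 := d.insert k ((PySem.List.sorted (T.getD k []) (fun x => x.1)).map (fun x => x.2))
        d1.insert k (pyGroupHeads (d1.getD k []))) PySem.Dict.empty).items from rfl]
  rw [phase2_items T hnodup, hkeys]
  exact List.map_congr_left (fun n _ => by rw [hval n])

-- ---- characterisation of B ----

theorem B0_getD (stream : List Int) : ∀ (d : PySem.Dict Int (List Int)),
    (∀ n, d.getD n [] = []) → ∀ n, (stream.foldl stepB0 d).getD n [] = [] := by
  induction stream with
  | nil => intro d h n; exact h n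
  | cons m stream ih =>
    intro d h n
    rw [List.foldl_cons]
    refine ih _ (fun j => ?_) n
    unfold stepB0
    by_cases hc : d.contains m
    · rw [if_pos hc]; exact h j
    · rw [if_neg hc, PySem.Dict.getD_insert]
      by_cases hj : j = m
      · rw [if_pos hj]
      · rw [if_neg hj]; exact h j

theorem B0_keys (stream : List Int) : ∀ (d : PySem.Dict Int (List Int)),
    (stream.foldl stepB0 d).keys = PySem.Set.update d.keys stream := by
  induction stream with
  | nil => intro d; rfl
  | cons m stream ih =>
    intro d
    have hstep : (stepB0 d m).keys = PySem.Set.add d.keys m := by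
      unfold stepB0
      by_cases hc : d.contains m
      · rw [if_pos hc,
          PySem.Set.add_of_mem ((PySem.Dict.contains_iff_mem_keys d m).mp hc)]
      · rw [if_neg hc, PySem.Dict.keys_insert_of_not_contains d [] (by simpa using hc),
          PySem.Set.add_of_not_mem (fun hm =>
            hc ((PySem.Dict.contains_iff_mem_keys d m).mpr hm))]
    rw [List.foldl_cons, PySem.Set.update_cons, ih, hstep]

theorem B_main_getD (P : List (Int × (Int × List Int))) :
    ∀ (d : PySem.Dict Int (List Int)) (n : Int),
      (P.foldl stepB d).getD n [] = dcFold (occOf P n) (d.getD n []) := by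
  induction P with
  | nil => intro d n; rfl
  | cons q P ih =>
    intro d n
    rw [List.foldl_cons]
    by_cases hg : q.1 < (q.2.2.length : Int)
    · rcases hget : PySem.List.pyGet? q.2.2 q.1 with _ | m
      · have hstep : stepB d q = d := by unfold stepB; rw [if_pos hg, hget]
        have hocc : occOf (q :: P) n = occOf P n := by
          unfold occOf
          rw [List.filterMap_cons, if_neg (by rw [hget]; rintro ⟨-, h⟩; cases h)]
        rw [hstep, hocc]
        exact ih d n
      · have hstep : stepB d q = if (d.getD m []).getLast? == some q.2.1 then d
            else d.insert m (d.getD m [] ++ [q.2.1]) := by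
          unfold stepB; rw [if_pos hg, hget]
        by_cases hmn : m = n
        · subst hmn
          have hocc : occOf (q :: P) m = q.2.1 :: occOf P m := by
            unfold occOf
            rw [List.filterMap_cons, if_pos ⟨hg, hget⟩]
          have hval : (stepB d q).getD m [] = dcStep (d.getD m []) q.2.1 := by
            rw [hstep]
            unfold dcStep
            by_cases hl : (d.getD m []).getLast? == some q.2.1
            · rw [if_pos hl, if_pos hl]
            · rw [if_neg hl, if_neg hl, PySem.Dict.getD_insert_self]
          rw [hocc, ih (stepB d q) m, hval]
          simp [dcFold]
        · have hocc : occOf (q :: P) n = occOf P n := by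
            unfold occOf
            rw [List.filterMap_cons,
              if_neg (by rw [hget]; rintro ⟨-, h⟩; exact hmn (Option.some.inj h))]
          have hval : (stepB d q).getD n [] = d.getD n [] := by
            rw [hstep]
            by_cases hl : (d.getD m []).getLast? == some q.2.1
            · rw [if_pos hl]
            · rw [if_neg hl, PySem.Dict.getD_insert, if_neg (fun e => hmn e.symm)]
          rw [hocc, ih (stepB d q) n, hval]
    · have hstep : stepB d q = d := by unfold stepB; rw [if_neg hg]
      have hocc : occOf (q :: P) n = occOf P n := by
        unfold occOf
        rw [List.filterMap_cons, if_neg (by rintro ⟨h, -⟩; exact hg h)]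
      rw [hstep, hocc]
      exact ih d n

theorem B_main_keys (P : List (Int × (Int × List Int))) :
    ∀ (d : PySem.Dict Int (List Int)),
      (∀ q ∈ P, ∀ m : Int, PySem.List.pyGet? q.2.2 q.1 = some m → m ∈ d.keys) →
      (P.foldl stepB d).keys = d.keys := by
  induction P with
  | nil => intro d _; rfl
  | cons q P ih =>
    intro d h
    have hkeys : (stepB d q).keys = d.keys := by
      unfold stepB
      by_cases hg : q.1 < (q.2.2.length : Int)
      · rw [if_pos hg]
        rcases hget : PySem.List.pyGet? q.2.2 q.1 with _ | m
        · rfl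
        · show (if _ then d else d.insert m _).keys = d.keys
          by_cases hl : (d.getD m []).getLast? == some q.2.1
          · rw [if_pos hl]
          · rw [if_neg hl]
            exact PySem.Dict.keys_insert_of_contains d _
              ((PySem.Dict.contains_iff_mem_keys d m).mpr
                (h q List.mem_cons_self m hget))
      · rw [if_neg hg]
    rw [List.foldl_cons, ih (stepB d q)
      (fun p hp m hm => by rw [hkeys]; exact h p (List.mem_cons_of_mem _ hp) m hm), hkeys]

theorem B_char (plans : List (Int × List Int)) :
    make_node_constraints_alt plans =
      (PySem.Set.ofList (nodeStream plans)).map (fun n => (n, dcFold (occOf (bPairs plans) n) [])) := by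
  unfold make_node_constraints_alt
  show (List.foldl (fun d t => List.foldl (fun d rp => stepB d (t, rp)) d plans)
      (List.foldl (fun d rp => List.foldl stepB0 d rp.2) PySem.Dict.empty plans)
      (PySem.List.pyRange 0 (horizonOf plans))).items = _
  have h1 : List.foldl (fun d rp => List.foldl stepB0 d rp.2) PySem.Dict.empty plans =
      (nodeStream plans).foldl stepB0 PySem.Dict.empty := by
    unfold nodeStream
    rw [List.foldl_flatMap]
  have h2 : ∀ dd : PySem.Dict Int (List Int),
      List.foldl (fun d t => List.foldl (fun d rp => stepB d (t, rp)) d plans) dd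
        (PySem.List.pyRange 0 (horizonOf plans)) = (bPairs plans).foldl stepB dd := by
    intro dd
    unfold bPairs
    rw [List.foldl_flatMap]
    refine congrArg (fun F => List.foldl F dd _) (funext fun acc => funext fun t => ?_)
    rw [List.foldl_map]
  rw [h1, h2]
  set D0 := (nodeStream plans).foldl stepB0 PySem.Dict.empty with hD0
  have hkeys : D0.keys = PySem.Set.ofList (nodeStream plans) := by
    rw [hD0, B0_keys, PySem.Dict.keys_empty, PySem.Set.update_nil_left]
  have hgetD : ∀ n : Int, D0.getD n [] = [] :=
    B0_getD _ _ (fun n => PySem.Dict.getD_empty n [])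
  have hmem : ∀ q ∈ bPairs plans, ∀ m : Int,
      PySem.List.pyGet? q.2.2 q.1 = some m → m ∈ D0.keys := by
    intro q hq m hm
    rcases List.mem_flatMap.mp hq with ⟨t, -, hq'⟩
    rcases List.mem_map.mp hq' with ⟨rp, hrp, rfl⟩
    rw [hkeys]
    exact (PySem.Set.mem_ofList _ _).mpr
      (List.mem_flatMap.mpr ⟨rp, hrp, mem_of_pyGet?_eq_some hm⟩)
  have hkeysMain := B_main_keys (bPairs plans) D0 hmem
  have hnodup : ((bPairs plans).foldl stepB D0).keys.Nodup := by
    rw [hkeysMain, hkeys]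
    exact PySem.Set.nodup_ofList _
  rw [PySem.Dict.items_eq_map_keys _ hnodup [], hkeysMain, hkeys]
  exact List.map_congr_left (fun n _ => by rw [B_main_getD, hgetD n])

-- ---- the per-node core equality ----

theorem enumerate_fiber (p : List Int) (n r : Int) : ∀ (s t : Int), 0 ≤ s →
    ((((PySem.List.enumerate p s).filter (fun tn => tn.2 == n)).map (fun tn => (tn.1, r))).filter
        (fun q => q.1 == t)) =
      if s ≤ t ∧ t < s + p.length ∧ p[(t - s).toNat]? = some n then [(t, r)] else [] := by
  induction p with
  | nil =>
    intro s t _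
    rw [PySem.List.enumerate_nil]
    simp only [List.filter_nil, List.map_nil, List.length_nil]
    rw [if_neg (by rintro ⟨h1, h2, -⟩; omega)]
  | cons a p ih =>
    intro s t hs
    have hrec := ih (s + 1) t (by omega)
    have tail_eq : ∀ _ : ¬(a = n ∧ s = t),
        (if s + 1 ≤ t ∧ t < s + 1 + (p.length : Int) ∧ p[(t - (s + 1)).toNat]? = some n
          then [(t, r)] else []) =
        (if s ≤ t ∧ t < s + ((a :: p).length : Int) ∧ (a :: p)[(t - s).toNat]? = some n
          then [(t, r)] else []) := by
      intro hdrop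
      by_cases hle : s + 1 ≤ t
      · have hidx : (t - s).toNat = (t - (s + 1)).toNat + 1 := by omega
        refine if_congr ?_ rfl rfl
        constructor
        · rintro ⟨h1, h2, h3⟩
          refine ⟨by omega, ?_, ?_⟩
          · simp only [List.length_cons]; push_cast; omega
          · rw [hidx, List.getElem?_cons_succ]; exact h3
        · rintro ⟨h1, h2, h3⟩
          refine ⟨hle, ?_, ?_⟩
          · simp only [List.length_cons] at h2; push_cast at h2; omega
          · rw [hidx, List.getElem?_cons_succ] at h3; exact h3
      · by_cases hst : s = t
        · have han : a ≠ n := fun h => hdrop ⟨h, hst⟩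
          rw [if_neg (by rintro ⟨h1, -, -⟩; omega)]
          rw [if_neg ?_]
          rintro ⟨-, -, h3⟩
          rw [show (t - s).toNat = 0 by omega] at h3
          rw [List.getElem?_cons_zero] at h3
          exact han (Option.some.inj h3)
        · rw [if_neg (by rintro ⟨h1, -, -⟩; omega),
            if_neg (by rintro ⟨h1, -, -⟩; omega)]
    rw [PySem.List.enumerate_cons, List.filter_cons]
    by_cases han : a = n
    · rw [if_pos (by simpa using han), List.map_cons, List.filter_cons]
      by_cases hst : s = t
      · have hcond : s ≤ t ∧ t < s + ((a :: p).length : Int) ∧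
            (a :: p)[(t - s).toNat]? = some n := by
          refine ⟨le_of_eq hst, by simp; omega, ?_⟩
          rw [show (t - s).toNat = 0 by omega, List.getElem?_cons_zero, han]
        rw [if_pos (by simpa using hst), hrec,
          if_neg (by rintro ⟨h1, -, -⟩; omega), if_pos hcond, hst]
      · rw [if_neg (by simpa using hst), hrec]
        exact tail_eq (fun h => hst h.2)
    · rw [if_neg (by simpa using han), hrec]
      exact tail_eq (fun h => han h.1)

theorem filterMap_eq_flatMap_toList {α β : Type} (f : α → Option β) (l : List α) :
    l.filterMap f = l.flatMap (fun a => (f a).toList) := by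
  induction l with
  | nil => rfl
  | cons a l ih => rw [List.filterMap_cons, List.flatMap_cons, ← ih]; cases f a <;> simp

theorem core_eq (plans : List (Int × List Int)) (n : Int) :
    aTrans (((trips plans).filter (fun p => p.1 == n)).map (fun p => p.2)) =
      dcFold (occOf (bPairs plans) n) [] := by
  have hcollect : ((trips plans).filter (fun p => p.1 == n)).map (fun p => p.2) =
      plans.flatMap (fun rp =>
        ((PySem.List.enumerate rp.2).filter (fun tn => tn.2 == n)).map
          (fun tn => (tn.1, rp.1))) := by
    unfold trips
    rw [List.filter_flatMap, List.map_flatMap]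
    refine flatMap_congr_mem (fun rp _ => ?_)
    rw [List.filter_map, List.map_map]
    rfl
  have hY : occOf (bPairs plans) n =
      (PySem.List.pyRange 0 (horizonOf plans)).flatMap (fun t =>
        plans.filterMap (fun rp =>
          if t < (rp.2.length : Int) ∧ PySem.List.pyGet? rp.2 t = some n then some rp.1
          else none)) := by
    unfold occOf bPairs
    rw [List.filterMap_flatMap]
    refine flatMap_congr_mem (fun t _ => ?_)
    rw [List.filterMap_map]
    rfl
  have hbound : ∀ q ∈ ((trips plans).filter (fun p => p.1 == n)).map (fun p => p.2),
      0 ≤ q.1 ∧ q.1 < horizonOf plans := by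
    rw [hcollect]
    intro q hq
    rcases List.mem_flatMap.mp hq with ⟨rp, hrp, hq'⟩
    rcases List.mem_map.mp hq' with ⟨tn, htn, rfl⟩
    have htn' := (List.mem_filter.mp htn).1
    rcases (PySem.List.mem_enumerate_iff _ _ _).mp htn' with ⟨k, hk, rfl⟩
    have hle := length_le_horizonOf plans rp hrp
    constructor
    · show (0 : Int) ≤ (0 : Int) + (k : Int)
      omega
    · show (0 : Int) + (k : Int) < _
      omega
  have per_t : ∀ t : Int, 0 ≤ t →
      (((plans.flatMap (fun rp =>
          ((PySem.List.enumerate rp.2).filter (fun tn => tn.2 == n)).map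
            (fun tn => (tn.1, rp.1)))).filter (fun q => q.1 == t)).map (fun q => q.2)) =
        plans.filterMap (fun rp =>
          if t < (rp.2.length : Int) ∧ PySem.List.pyGet? rp.2 t = some n then some rp.1
          else none) := by
    intro t ht
    rw [List.filter_flatMap, List.map_flatMap, filterMap_eq_flatMap_toList]
    refine flatMap_congr_mem (fun rp _ => ?_)
    rw [enumerate_fiber rp.2 n rp.1 0 t le_rfl]
    have hcast : PySem.List.pyGet? rp.2 t = rp.2[(t - 0).toNat]? := by
      rw [show t = ((t.toNat : Nat) : Int) by omega, PySem.List.pyGet?_natCast,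
        show ((((t.toNat : Nat) : Int) - 0).toNat) = t.toNat by omega]
    by_cases hc : t < (rp.2.length : Int) ∧ PySem.List.pyGet? rp.2 t = some n
    · rw [if_pos ⟨ht, by omega, by rw [← hcast]; exact hc.2⟩, if_pos hc]
      rfl
    · rw [if_neg (by rintro ⟨-, h2, h3⟩; exact hc ⟨by omega, by rw [hcast]; exact h3⟩),
        if_neg hc]
      rfl
  unfold aTrans
  rw [sorted_eq_fiber_flatMap _ (horizonOf plans) hbound, ← dcFold_nil_eq_groupHeads]
  refine congrArg (fun x => dcFold x []) ?_
  rw [List.map_flatMap, hY]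
  refine flatMap_congr_mem (fun t htm => ?_)
  rw [hcollect]
  exact per_t t (mem_pyRange_zero.mp htm).1

-- ===== VERDICT (by name: the statement is the Claim_ definition above) =====
theorem make_node_constraints_spec : Claim_equal_make_node_constraints := by
  intro plans _
  unfold Spec_make_node_constraints
  rw [A_char, B_char]
  exact List.map_congr_left (fun n _ => by rw [core_eq])
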